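-- pv_equiv track=rewrite | github.com/andy-bio/genetic-interactions | my_methods.py | most_connected_alleles
-- ===== SOURCE A (Python) =====
-- import copy
--
-- def most_connected_alleles(network, num_of_alleles):
--     """ This method finds the num_of_hubs most connected hubs. It doesn't split the alleles names like the method find_hubs
--     """
--     dic = copy.deepcopy(network)
--     counter = {}
--     for gene in dic.keys():
--         counter[gene] = len(dic[gene].keys())
--     dic = [(k,v) for k,v in counter.items()]
--     dic.sort(key=lambda x: x[1], reverse=True)
--     return list(map(lambda x: x[0], dic))[:num_of_alleles]
-- ===== SOURCE B (Python) =====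
-- def most_connected_alleles(network, num_of_alleles):
--     """Top-num_of_alleles gene names by neighbor count, by one counting pass into
--     count-buckets walked from the highest count down (no comparison sort)."""
--     buckets = {}
--     mx = -1
--     for gene, neighbors in network.items():
--         c = len(neighbors)
--         buckets[c] = buckets.get(c, []) + [gene]
--         if c > mx:
--             mx = c
--     result = []
--     for c in range(mx, -1, -1):
--         if c in buckets:
--             result.extend(buckets[c])
--     return result[:num_of_alleles]
-- ===== Notes on version B (the rewrite author's own statement) =====
-- stated objective: alternative
-- what changed: Replaces deepcopy + counter dict + comparison sort by count with a single counting pass into count-indexed buckets (insertion order kept per bucket) that are flushed from the maximum count down to 0, then the same final slice.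
import Mathlib
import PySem

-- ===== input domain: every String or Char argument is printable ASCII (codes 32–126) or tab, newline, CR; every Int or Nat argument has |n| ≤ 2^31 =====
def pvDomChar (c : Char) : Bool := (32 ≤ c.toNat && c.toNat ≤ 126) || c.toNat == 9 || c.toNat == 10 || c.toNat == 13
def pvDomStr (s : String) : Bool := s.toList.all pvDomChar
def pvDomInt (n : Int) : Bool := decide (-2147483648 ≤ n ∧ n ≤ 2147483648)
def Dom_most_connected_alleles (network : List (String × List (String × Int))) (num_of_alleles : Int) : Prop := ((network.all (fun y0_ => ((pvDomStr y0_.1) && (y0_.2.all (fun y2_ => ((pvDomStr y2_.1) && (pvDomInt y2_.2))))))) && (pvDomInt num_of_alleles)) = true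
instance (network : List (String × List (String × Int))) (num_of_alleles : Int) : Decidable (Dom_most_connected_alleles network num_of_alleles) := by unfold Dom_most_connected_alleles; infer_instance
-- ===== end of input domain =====

-- B replaces A's count-then-comparison-sort with a counting pass into count-indexed
-- buckets flushed from the maximum count down (objective: alternative algorithm).

-- ===== PORT A =====
-- The dict arguments are interpreted via PySem.Dict.ofList (Python dict semantics:
-- first key position, last value wins); deepcopy is the identity at the value level.
def most_connected_alleles (network : List (String × List (String × Int))) (num_of_alleles : Int) : List String :=
  let dic := PySem.Dict.ofList network
  -- for gene in dic.keys(): counter[gene] = len(dic[gene].keys())  (kv.2 is dic[gene])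
  let counter : PySem.Dict String Int :=
    dic.items.foldl (fun c kv => c.insert kv.1 (((PySem.Dict.ofList kv.2).size : Int))) PySem.Dict.empty
  let pairs := counter.items
  let sortedPairs := PySem.List.sorted pairs (fun x => x.2) true
  PySem.List.slice (sortedPairs.map (fun x => x.1)) none (some num_of_alleles)

-- ===== PORT B =====
def most_connected_alleles_alt (network : List (String × List (String × Int))) (num_of_alleles : Int) : List String :=
  -- for gene, neighbors in network.items(): c = len(neighbors); buckets[c] = buckets.get(c, []) + [gene]; if c > mx: mx = c
  let st := (PySem.Dict.ofList network).items.foldl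
      (fun (st : PySem.Dict Int (List String) × Int) kv =>
        (st.1.modify ((PySem.Dict.ofList kv.2).size : Int) [] (fun l => l ++ [kv.1]),
         if ((PySem.Dict.ofList kv.2).size : Int) > st.2 then ((PySem.Dict.ofList kv.2).size : Int) else st.2))
      ((PySem.Dict.empty : PySem.Dict Int (List String)), (-1 : Int))
  -- for c in range(mx, -1, -1): if c in buckets: result.extend(buckets[c])
  let result := (PySem.List.pyRange st.2 (-1) (-1)).foldl
      (fun acc c => if st.1.contains c then acc ++ st.1.getD c [] else acc) []
  PySem.List.slice result none (some num_of_alleles)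

-- ===== PRECONDITION & SPEC =====
def Spec_most_connected_alleles (network : List (String × List (String × Int))) (num_of_alleles : Int) (out : List String) : Prop := out = most_connected_alleles_alt network num_of_alleles
instance (network : List (String × List (String × Int))) (num_of_alleles : Int) (out : List String) : Decidable (Spec_most_connected_alleles network num_of_alleles out) := by unfold Spec_most_connected_alleles; infer_instance

-- ===== CLAIM (what is proved, stated in full; the proofs are below) =====
def Claim_equal_most_connected_alleles : Prop := ∀ (network : List (String × List (String × Int))) (num_of_alleles : Int), Dom_most_connected_alleles network num_of_alleles → Spec_most_connected_alleles network num_of_alleles (most_connected_alleles network num_of_alleles)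

-- ===== LEMMAS AND PROOFS =====

-- buckets of a pair list, highest count first: bucket (n-1) ++ … ++ bucket 0
def bucketsDesc (xs : List (String × Int)) : Nat → List (String × Int)
  | 0 => []
  | n+1 => xs.filter (fun p => p.2 == ((n : Nat) : Int)) ++ bucketsDesc xs n

theorem bucketsDesc_nil (n : Nat) : bucketsDesc [] n = [] := by
  induction n with
  | zero => rfl
  | succ n ih => simp [bucketsDesc, ih]

theorem mem_bucketsDesc {xs : List (String × Int)} {n : Nat} {p : String × Int}
    (h : p ∈ bucketsDesc xs n) : 0 ≤ p.2 ∧ p.2 < (n : Int) := by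
  induction n with
  | zero => simp [bucketsDesc] at h
  | succ n ih =>
    simp only [bucketsDesc, List.mem_append, List.mem_filter] at h
    rcases h with ⟨_, h2⟩ | h
    · have : p.2 = (n : Int) := by simpa using h2
      omega
    · have := ih h
      omega

theorem bucketsDesc_append_high {xs : List (String × Int)} {x : String × Int} {n : Nat}
    (hx : (n : Int) ≤ x.2) : bucketsDesc (xs ++ [x]) n = bucketsDesc xs n := by
  induction n with
  | zero => rfl
  | succ n ih =>
    have hne : (x.2 == ((n : Nat) : Int)) = false := by
      simp only [beq_eq_false_iff_ne, ne_eq]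
      intro h
      rw [h] at hx
      exact absurd hx (by push_cast; omega)
    simp only [bucketsDesc, List.filter_append, List.filter_cons, hne, List.filter_nil,
      Bool.false_eq_true, if_false, List.append_nil]
    rw [ih (le_trans (by push_cast; omega) hx)]

theorem insertBy_front {x : String × Int} {l : List (String × Int)}
    (h : ∀ y ∈ l, y.2 < x.2) :
    PySem.List.insertBy (fun a b => decide (b.2 < a.2)) x l = x :: l := by
  cases l with
  | nil => rfl
  | cons y ys =>
    have hy : (decide (y.2 < x.2)) = true := by simp [h y (by simp)]
    simp [PySem.List.insertBy, hy]

theorem insertBy_skip {x : String × Int} {l₁ l₂ : List (String × Int)}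
    (h : ∀ y ∈ l₁, ¬ y.2 < x.2) :
    PySem.List.insertBy (fun a b => decide (b.2 < a.2)) x (l₁ ++ l₂)
      = l₁ ++ PySem.List.insertBy (fun a b => decide (b.2 < a.2)) x l₂ := by
  induction l₁ with
  | nil => simp
  | cons y ys ih =>
    have hy : (decide (y.2 < x.2)) = false := by simp [h y (by simp)]
    simp only [List.cons_append, PySem.List.insertBy, hy, Bool.false_eq_true, if_false]
    rw [ih (fun z hz => h z (by simp [hz]))]

theorem insertBy_bucketsDesc {x : String × Int} (xs : List (String × Int)) {n : Nat}
    (h0 : 0 ≤ x.2) (hn : x.2 < (n : Int)) :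
    PySem.List.insertBy (fun a b => decide (b.2 < a.2)) x (bucketsDesc xs n)
      = bucketsDesc (xs ++ [x]) n := by
  induction n with
  | zero => exact absurd hn (by push_cast; omega)
  | succ n ih =>
    have hskip : ∀ y ∈ xs.filter (fun p => p.2 == ((n : Nat) : Int)), ¬ y.2 < x.2 := by
      intro y hy
      have hy2 : y.2 = (n : Int) := by simpa using (List.mem_filter.mp hy).2
      have : x.2 < ((n : Nat) + 1 : Int) := by push_cast at hn ⊢; omega
      omega
    simp only [bucketsDesc]
    rw [insertBy_skip hskip]
    by_cases hx : x.2 = (n : Int)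
    · have hfront : ∀ y ∈ bucketsDesc xs n, y.2 < x.2 := by
        intro y hy; have := mem_bucketsDesc hy; omega
      rw [insertBy_front hfront]
      have hxe : (x.2 == ((n : Nat) : Int)) = true := by simpa using hx
      rw [bucketsDesc_append_high (le_of_eq hx.symm)]
      simp [List.filter_append, hxe]
    · have hlt : x.2 < (n : Int) := by
        have : x.2 < ((n : Nat) + 1 : Int) := by push_cast at hn ⊢; omega
        omega
      rw [ih hlt]
      have hxe : (x.2 == ((n : Nat) : Int)) = false := by simpa using hx
      simp [List.filter_append, hxe]

theorem sorted_eq_bucketsDesc (xs : List (String × Int)) (n : Nat)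
    (h : ∀ p ∈ xs, 0 ≤ p.2 ∧ p.2 < (n : Int)) :
    PySem.List.sorted xs (fun p => p.2) true = bucketsDesc xs n := by
  induction xs using List.reverseRecOn with
  | nil => simp [bucketsDesc_nil, PySem.List.sorted_eq_nil_iff]
  | append_singleton xs x ih =>
    rw [PySem.List.sorted_rev_eq_foldl_insertBy, List.foldl_append,
      ← PySem.List.sorted_rev_eq_foldl_insertBy]
    simp only [List.foldl_cons, List.foldl_nil]
    rw [ih (fun p hp => h p (by simp [hp]))]
    exact insertBy_bucketsDesc xs (h x (by simp)).1 (h x (by simp)).2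

-- the flush from count (n-1) down to 0 is bucketsDesc
theorem pyRange_flatMap_filter (xs : List (String × Int)) (n : Nat) :
    (PySem.List.pyRange ((n : Int) - 1) (-1) (-1)).flatMap
        (fun c => xs.filter (fun p => p.2 == c)) = bucketsDesc xs n := by
  induction n with
  | zero => rw [PySem.List.pyRange_neg_one_eq_nil (by omega)]; rfl
  | succ n ih =>
    have e : ((n + 1 : Nat) : Int) - 1 = (n : Int) := by push_cast; ring
    rw [e, PySem.List.pyRange_neg_one_cons (by omega)]
    simp only [List.flatMap_cons, bucketsDesc]
    rw [ih]

-- the running-max fold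
theorem foldl_max_spec (l : List Int) (m : Int) :
    m ≤ l.foldl (fun m c => if c > m then c else m) m ∧
    (∀ c ∈ l, c ≤ l.foldl (fun m c => if c > m then c else m) m) := by
  induction l generalizing m with
  | nil => simp
  | cons c t ih =>
    simp only [List.foldl_cons, List.mem_cons]
    constructor
    · calc m ≤ (if c > m then c else m) := by split_ifs <;> omega
        _ ≤ _ := (ih _).1
    · intro d hd
      rcases hd with rfl | hd
      · calc d ≤ (if d > m then d else m) := by split_ifs <;> omega
          _ ≤ _ := (ih _).1
      · exact (ih _).2 d hd

theorem most_connected_core (items : List (String × List (String × Int))) (num : Int)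
    (hnodup : (items.map (fun kv => kv.1)).Nodup) :
    PySem.List.slice
      ((PySem.List.sorted
        (items.foldl (fun c kv => c.insert kv.1 (((PySem.Dict.ofList kv.2).size : Int)))
          (PySem.Dict.empty : PySem.Dict String Int)).items
        (fun x => x.2) true).map (fun x => x.1)) none (some num)
    = PySem.List.slice
        ((PySem.List.pyRange (items.foldl (fun (st : PySem.Dict Int (List String) × Int) kv => (st.1.modify ((PySem.Dict.ofList kv.2).size : Int) [] (fun l => l ++ [kv.1]), if ((PySem.Dict.ofList kv.2).size : Int) > st.2 then ((PySem.Dict.ofList kv.2).size : Int) else st.2)) ((PySem.Dict.empty : PySem.Dict Int (List String)), (-1 : Int))).2 (-1) (-1)).foldl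
          (fun acc c => if (items.foldl (fun (st : PySem.Dict Int (List String) × Int) kv => (st.1.modify ((PySem.Dict.ofList kv.2).size : Int) [] (fun l => l ++ [kv.1]), if ((PySem.Dict.ofList kv.2).size : Int) > st.2 then ((PySem.Dict.ofList kv.2).size : Int) else st.2)) ((PySem.Dict.empty : PySem.Dict Int (List String)), (-1 : Int))).1.contains c then acc ++ (items.foldl (fun (st : PySem.Dict Int (List String) × Int) kv => (st.1.modify ((PySem.Dict.ofList kv.2).size : Int) [] (fun l => l ++ [kv.1]), if ((PySem.Dict.ofList kv.2).size : Int) > st.2 then ((PySem.Dict.ofList kv.2).size : Int) else st.2)) ((PySem.Dict.empty : PySem.Dict Int (List String)), (-1 : Int))).1.getD c [] else acc) []) none (some num) := by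
  set counts : List (String × Int) :=
    items.map (fun kv => (kv.1, ((PySem.Dict.ofList kv.2).size : Int))) with hcounts
  -- A's counter.items = counts
  have hcounter :
      (items.foldl (fun c kv => c.insert kv.1 (((PySem.Dict.ofList kv.2).size : Int)))
        (PySem.Dict.empty : PySem.Dict String Int)).items = counts := by
    rw [PySem.Dict.items_foldl_insert_fresh items (fun kv => kv.1)
      (fun kv => ((PySem.Dict.ofList kv.2).size : Int)) PySem.Dict.empty
      (by intro a _; simp [PySem.Dict.contains_empty]) hnodup]
    rw [show (PySem.Dict.empty : PySem.Dict String Int).items = [] from rfl]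
    simp [hcounts]
  rw [hcounter]
  -- B's pair fold splits into the bucket fold and the max fold
  rw [PySem.List.foldl_prod_mk
    (fun (d : PySem.Dict Int (List String)) kv => d.modify ((PySem.Dict.ofList kv.2).size : Int) [] (fun l => l ++ [kv.1]))
    (fun (m : Int) kv => if ((PySem.Dict.ofList kv.2).size : Int) > m then ((PySem.Dict.ofList kv.2).size : Int) else m)
    items PySem.Dict.empty (-1)]
  set buckets := items.foldl
    (fun (d : PySem.Dict Int (List String)) kv => d.modify ((PySem.Dict.ofList kv.2).size : Int) [] (fun l => l ++ [kv.1]))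
    PySem.Dict.empty with hbuckets
  set mx := items.foldl
    (fun (m : Int) kv => if ((PySem.Dict.ofList kv.2).size : Int) > m then ((PySem.Dict.ofList kv.2).size : Int) else m)
    (-1) with hmx
  -- bucket lookups are filters of counts
  have hget : ∀ c : Int, buckets.getD c [] = (counts.filter (fun p => p.2 == c)).map (fun p => p.1) := by
    intro c
    have h1 : buckets = (items.map (fun kv => (((PySem.Dict.ofList kv.2).size : Int), kv.1))).foldl
        (fun (d : PySem.Dict Int (List String)) p => d.modify p.1 [] (fun l => l ++ [p.2])) PySem.Dict.empty := by
      rw [hbuckets, List.foldl_map]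
    rw [h1, PySem.Dict.getD_foldl_modify_append]
    rw [show (PySem.Dict.empty : PySem.Dict Int (List String)).getD c [] = [] from rfl]
    simp [List.filter_map, List.map_map, hcounts, Function.comp_def]
  -- the flush loop equals the flatMap of the bucket filters
  have hflush : ((PySem.List.pyRange mx (-1) (-1)).foldl
      (fun acc c => if buckets.contains c then acc ++ buckets.getD c [] else acc) []) =
      ((PySem.List.pyRange mx (-1) (-1)).flatMap
        (fun c => (counts.filter (fun p => p.2 == c)).map (fun p => p.1))) := by
    have hstep : (fun (acc : List String) (c : Int) => if buckets.contains c then acc ++ buckets.getD c [] else acc)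
        = fun acc c => acc ++ (counts.filter (fun p => p.2 == c)).map (fun p => p.1) := by
      funext acc c
      by_cases hc : buckets.contains c
      · simp [hc, hget c]
      · have hz : buckets.getD c [] = [] :=
          PySem.Dict.getD_of_not_contains buckets [] (by simpa using hc)
        rw [← hget c, hz]
        simp [hc]
    rw [hstep, PySem.List.foldl_append_eq_flatMap]
    simp
  rw [hflush]
  -- max fold facts
  have hmax := foldl_max_spec (items.map (fun kv => (((PySem.Dict.ofList kv.2).size : Int)))) (-1)
  have hmx' : mx = (items.map (fun kv => (((PySem.Dict.ofList kv.2).size : Int)))).foldl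
      (fun m c => if c > m then c else m) (-1) := by
    rw [hmx, List.foldl_map]
  rcases hmax with ⟨hge, hub⟩
  rw [← hmx'] at hge hub
  -- relate A's sorted list to the flush
  congr 1
  rcases Classical.em (items = []) with hnil | hne
  · rw [hmx, hnil]
    simp only [List.foldl_nil]
    rw [PySem.List.pyRange_neg_one_eq_nil (by omega : (-1 : Int) ≤ -1)]
    simp [hcounts, hnil, PySem.List.sorted_eq_nil_iff]
  · -- mx ≥ 0 since items is nonempty and the counts are nonnegative
    have hmem : ∃ kv, kv ∈ items := by
      cases items with
      | nil => exact absurd rfl hne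
      | cons a t => exact ⟨a, by simp⟩
    rcases hmem with ⟨kv0, hkv0⟩
    have hmx0 : 0 ≤ mx := by
      have h1 := hub (((PySem.Dict.ofList kv0.2).size : Int)) (List.mem_map_of_mem hkv0)
      have h2 : (0 : Int) ≤ ((PySem.Dict.ofList kv0.2).size : Int) := Int.natCast_nonneg _
      omega
    set n : Nat := (mx + 1).toNat with hn
    have hcast : (n : Int) - 1 = mx := by omega
    have hbnd : ∀ p ∈ counts, 0 ≤ p.2 ∧ p.2 < (n : Int) := by
      intro p hp
      rw [hcounts] at hp
      rcases List.mem_map.mp hp with ⟨kv, hkv, rfl⟩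
      refine ⟨Int.natCast_nonneg _, ?_⟩
      have := hub (((PySem.Dict.ofList kv.2).size : Int)) (List.mem_map_of_mem hkv)
      omega
    rw [sorted_eq_bucketsDesc counts n hbnd, ← pyRange_flatMap_filter counts n, hcast,
      List.map_flatMap]

theorem most_connected_alleles_eq (network : List (String × List (String × Int)))
    (num_of_alleles : Int) :
    most_connected_alleles network num_of_alleles
      = most_connected_alleles_alt network num_of_alleles := by
  have hnodup : ((PySem.Dict.ofList network).items.map (fun kv => kv.1)).Nodup := by
    have h := PySem.Dict.nodup_keys_ofList network
    simpa [PySem.Dict.keys] using h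
  exact most_connected_core (PySem.Dict.ofList network).items num_of_alleles hnodup

-- ===== VERDICT (by name: the statement is the Claim_ definition above) =====
theorem most_connected_alleles_spec : Claim_equal_most_connected_alleles := by
  intro network num_of_alleles _
  unfold Spec_most_connected_alleles
  exact most_connected_alleles_eq network num_of_alleles
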